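-- pv_equiv track=rewrite | github.com/Tajamul21/Interpol_NTU_WP1 | run_parallel.py | greedy_balance_by_area
-- ===== SOURCE A (Python) =====
-- from typing import Any, Dict, List, Optional, Tuple, Union
--
-- def greedy_balance_by_area(image_records: List[Dict[str, Any]], num_shards: int) -> List[List[Dict[str, Any]]]:
--     shards: List[List[Dict[str, Any]]] = [[] for _ in range(num_shards)]
--     loads: List[int] = [0 for _ in range(num_shards)]
--
--     items = sorted(image_records, key=lambda x: int(x.get("area", 0)), reverse=True)
--     for record in items:
--         shard_idx = min(range(num_shards), key=lambda i: loads[i])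
--         shards[shard_idx].append(record)
--         loads[shard_idx] += max(1, int(record.get("area", 0)))
--
--     return shards
-- ===== SOURCE B (Python) =====
-- def greedy_balance_by_area(image_records, num_shards):
--     # Heaviest-first assignment via a sorted (load, shard) queue: record only
--     # the chosen shard index per item, then build all shard lists in one
--     # grouping pass at the end (no in-place shard mutation during the loop).
--     items = sorted(image_records, key=lambda x: int(x.get("area", 0)), reverse=True)
--     queue = [(0, i) for i in range(num_shards)]
--     assign = []
--     for record in items:
--         load, idx = queue.pop(0)
--         assign.append(idx)
--         entry = (load + max(1, int(record.get("area", 0))), idx)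
--         j = 0
--         while j < len(queue) and queue[j] <= entry:
--             j += 1
--         queue.insert(j, entry)
--     return [[rec for rec, s in zip(items, assign) if s == i] for i in range(num_shards)]
-- ===== Notes on version B (the rewrite author's own statement) =====
-- stated objective: alternative
-- what changed: B replaces A's per-record linear scan min(range(num_shards), key=loads) and in-place shard appends by a sorted (load, shard) priority queue that yields only a per-item shard-index assignment; the shard lists are then built in a single grouping pass at the end.
import Mathlib
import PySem

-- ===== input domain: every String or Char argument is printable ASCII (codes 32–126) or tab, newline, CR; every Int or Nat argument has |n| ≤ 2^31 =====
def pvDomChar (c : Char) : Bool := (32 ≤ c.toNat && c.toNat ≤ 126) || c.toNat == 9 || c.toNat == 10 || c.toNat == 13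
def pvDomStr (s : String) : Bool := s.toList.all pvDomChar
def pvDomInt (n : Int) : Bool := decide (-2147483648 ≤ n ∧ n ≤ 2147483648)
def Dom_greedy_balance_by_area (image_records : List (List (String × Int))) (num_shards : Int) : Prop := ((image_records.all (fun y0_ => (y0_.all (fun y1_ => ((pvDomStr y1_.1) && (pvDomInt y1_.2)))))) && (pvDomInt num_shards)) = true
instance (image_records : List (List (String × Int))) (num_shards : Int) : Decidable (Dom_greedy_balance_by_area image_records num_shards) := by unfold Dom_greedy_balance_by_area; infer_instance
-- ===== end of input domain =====

-- B replaces A's per-record linear scan for the least-loaded shard (and the in-place shard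
-- appends) by a sorted (load, index) priority queue yielding a per-item shard assignment,
-- with the shard lists built in one grouping pass at the end (objective: alternative).
-- ===== PORT A =====
-- the lambda `int(x.get("area", 0))` used by both Pythons
def recArea (x : List (String × Int)) : Int := (PySem.Dict.mk x).getD "area" 0

-- the body of A's `for record in items` loop; state = (shards, loads)
def stepA (num_shards : Int)
    (s : List (List (List (String × Int))) × List Int) (record : List (String × Int)) :
    List (List (List (String × Int))) × List Int :=
  -- `min(range(num_shards), key=lambda i: loads[i])`; `.getD 0` covers the empty range,
  -- where Python raises ValueError (excluded by Pre_)
  let shard_idx : Int :=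
    (PySem.List.min? (PySem.List.pyRange 0 num_shards 1) (fun i => PySem.List.pyGetD s.2 i 0)).getD 0
  (PySem.List.pySetD s.1 shard_idx (PySem.List.pyGetD s.1 shard_idx [] ++ [record]),
   PySem.List.pySetD s.2 shard_idx (PySem.List.pyGetD s.2 shard_idx 0 + max 1 (recArea record)))

def greedy_balance_by_area (image_records : List (List (String × Int))) (num_shards : Int) :
    List (List (List (String × Int))) :=
  let shards : List (List (List (String × Int))) :=
    (PySem.List.pyRange 0 num_shards 1).map (fun _ => [])
  let loads : List Int := (PySem.List.pyRange 0 num_shards 1).map (fun _ => 0)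
  let items := PySem.List.sorted image_records (fun x => recArea x) true
  (items.foldl (stepA num_shards) (shards, loads)).1

-- ===== PORT B =====
-- B's `j = 0; while j < len(queue) and queue[j] <= entry: j += 1; queue.insert(j, entry)`
def bInsert (queue : List (Int × Int)) (entry : Int × Int) : List (Int × Int) :=
  match queue with
  | [] => [entry]
  | x :: xs =>
      if x.1 < entry.1 || (x.1 == entry.1 && x.2 ≤ entry.2) then x :: bInsert xs entry
      else entry :: x :: xs

-- B's loop body; state = (assign, queue); on an empty queue Python's `queue.pop(0)`
-- raises IndexError (excluded by Pre_), the port leaves the state unchanged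
def bStep (s : List Int × List (Int × Int)) (record : List (String × Int)) :
    List Int × List (Int × Int) :=
  match s.2 with
  | [] => s
  | (load, idx) :: rest => (s.1 ++ [idx], bInsert rest (load + max 1 (recArea record), idx))

def greedy_balance_by_area_alt (image_records : List (List (String × Int))) (num_shards : Int) :
    List (List (List (String × Int))) :=
  let items := PySem.List.sorted image_records (fun x => recArea x) true
  let queue : List (Int × Int) := (PySem.List.pyRange 0 num_shards 1).map (fun i => (0, i))
  let assign := (items.foldl bStep ([], queue)).1
  -- `[[rec for rec, s in zip(items, assign) if s == i] for i in range(num_shards)]`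
  (PySem.List.pyRange 0 num_shards 1).map (fun i =>
    (items.zip assign).filterMap (fun p => if p.2 == i then some p.1 else none))

-- ===== PRECONDITION & SPEC =====
-- Pre_ excludes exactly the inputs where Python A raises (ValueError from `min` of an
-- empty range: num_shards < 1 with a non-empty record list); B raises IndexError there too.
def Pre_greedy_balance_by_area (image_records : List (List (String × Int))) (num_shards : Int) : Prop :=
  image_records = [] ∨ 1 ≤ num_shards
instance (image_records : List (List (String × Int))) (num_shards : Int) : Decidable (Pre_greedy_balance_by_area image_records num_shards) := by unfold Pre_greedy_balance_by_area; infer_instance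

def pvWitness_greedy_balance_by_area : (List (List (String × Int))) × Int :=
  ([[("area", 5)], [("area", 2)], [("area", 4)]], 2)

def Spec_greedy_balance_by_area (image_records : List (List (String × Int))) (num_shards : Int) (out : List (List (List (String × Int)))) : Prop := out = greedy_balance_by_area_alt image_records num_shards
instance (image_records : List (List (String × Int))) (num_shards : Int) (out : List (List (List (String × Int)))) : Decidable (Spec_greedy_balance_by_area image_records num_shards out) := by unfold Spec_greedy_balance_by_area; infer_instance

-- ===== CLAIM (what is proved, stated in full; the proofs are below) =====
def Claim_equal_greedy_balance_by_area : Prop := ∀ (image_records : List (List (String × Int))) (num_shards : Int), Dom_greedy_balance_by_area image_records num_shards → Pre_greedy_balance_by_area image_records num_shards → Spec_greedy_balance_by_area image_records num_shards (greedy_balance_by_area image_records num_shards)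

-- ===== LEMMAS AND PROOFS =====

-- intermediate, proof-only form of A's loop: queue-driven but still mutating the shard list
def stepQ (s : List (List (List (String × Int))) × List (Int × Int)) (record : List (String × Int)) :
    List (List (List (String × Int))) × List (Int × Int) :=
  match s.2 with
  | [] => s
  | (load, idx) :: rest =>
      (PySem.List.pySetD s.1 idx (PySem.List.pyGetD s.1 idx [] ++ [record]),
       bInsert rest (load + max 1 (recArea record), idx))

-- the assignment sequence B's loop produces, as a structural recursion
def runAssign (items : List (List (String × Int))) (q : List (Int × Int)) : List Int :=
  match items, q with
  | [], _ => []
  | _ :: _, [] => []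
  | r :: rs, (l, j) :: rest => j :: runAssign rs (bInsert rest (l + max 1 (recArea r), j))

def lexLe (a b : Int × Int) : Prop := a.1 < b.1 ∨ (a.1 = b.1 ∧ a.2 ≤ b.2)

lemma bInsert_perm (q : List (Int × Int)) (e : Int × Int) : (bInsert q e).Perm (e :: q) := by
  induction q with
  | nil => simp [bInsert]
  | cons x xs ih =>
    simp only [bInsert]
    split
    · exact ((ih.cons x).trans (List.Perm.swap e x xs))
    · exact List.Perm.refl _

lemma lexLe_trans {a b c : Int × Int} (h1 : lexLe a b) (h2 : lexLe b c) : lexLe a c := by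
  unfold lexLe at *; omega

lemma bInsert_pairwise {q : List (Int × Int)} (e : Int × Int) (h : q.Pairwise lexLe) :
    (bInsert q e).Pairwise lexLe := by
  induction q with
  | nil => simp [bInsert, List.pairwise_cons]
  | cons x xs ih =>
    rcases List.pairwise_cons.mp h with ⟨hx, hxs⟩
    simp only [bInsert]
    split
    · rename_i hcond
      have hxe : lexLe x e := by
        simp only [Bool.or_eq_true, Bool.and_eq_true, decide_eq_true_eq, beq_iff_eq] at hcond
        unfold lexLe; omega
      refine List.pairwise_cons.mpr ⟨?_, ih hxs⟩
      intro y hy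
      have : y ∈ e :: xs := (bInsert_perm xs e).mem_iff.mp hy
      rcases List.mem_cons.mp this with rfl | hy'
      · exact hxe
      · exact hx y hy'
    · rename_i hcond
      have hex : lexLe e x := by
        simp only [Bool.or_eq_true, Bool.and_eq_true, decide_eq_true_eq, beq_iff_eq] at hcond
        unfold lexLe; omega
      refine List.pairwise_cons.mpr ⟨?_, h⟩
      intro y hy
      rcases List.mem_cons.mp hy with rfl | hy'
      · exact hex
      · exact lexLe_trans hex (hx y hy')

lemma min_foldl_keep (f : Int → Int) (xs : List Int) (m : Int)
    (h : ∀ x ∈ xs, ¬ f x < f m) :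
    xs.foldl (fun acc x => match acc with
      | none => some x
      | some m' => if f x < f m' then some x else some m') (some m) = some m := by
  induction xs with
  | nil => rfl
  | cons x xs ih =>
    simp only [List.foldl_cons]
    rw [if_neg (h x (List.mem_cons_self))]
    exact ih (fun y hy => h y (List.mem_cons_of_mem _ hy))

lemma min?_eq_foldl (xs : List Int) (f : Int → Int) :
    PySem.List.min? xs f = xs.foldl (fun acc x => match acc with
      | none => some x
      | some m' => if f x < f m' then some x else some m') none := by
  unfold PySem.List.min?
  congr 1
  funext acc x
  cases acc <;> rfl

lemma min?_first (f : Int → Int) (n j : Int) (h0 : 0 ≤ j) (hj : j < n)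
    (hlt : ∀ i, 0 ≤ i → i < j → f j < f i) (hle : ∀ i, j ≤ i → i < n → f j ≤ f i) :
    PySem.List.min? (PySem.List.pyRange 0 n 1) f = some j := by
  rw [PySem.List.pyRange_one_append 0 j n h0 hj.le, PySem.List.pyRange_one_cons hj]
  rw [min?_eq_foldl, List.foldl_append, List.foldl_cons]
  have hkeep : ∀ acc, acc = some j →
      (PySem.List.pyRange (j+1) n 1).foldl (fun acc x => match acc with
        | none => some x
        | some m' => if f x < f m' then some x else some m') acc = some j := by
    rintro _ rfl
    exact min_foldl_keep f _ j (fun x hx => by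
      have := PySem.List.mem_pyRange_one.mp hx
      exact not_lt.mpr (hle x (by omega) (by omega)))
  rcases h : (PySem.List.pyRange 0 j 1).foldl (fun acc x => match acc with
      | none => some x
      | some m' => if f x < f m' then some x else some m') none with _ | m
  · rw [h]; exact hkeep _ rfl
  · rw [h]
    have hm : m ∈ PySem.List.pyRange 0 j 1 := PySem.List.min?_mem (by rw [min?_eq_foldl]; exact h)
    have := PySem.List.mem_pyRange_one.mp hm
    have : f j < f m := hlt m (by omega) (by omega)
    simp only [if_pos this]
    exact hkeep _ rfl

def pairs (n : Int) (loads : List Int) : List (Int × Int) :=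
  (PySem.List.pyRange 0 n 1).map (fun i => (PySem.List.pyGetD loads i 0, i))

lemma mem_pairs {n : Int} {loads : List Int} {l i : Int} :
    (l, i) ∈ pairs n loads ↔ 0 ≤ i ∧ i < n ∧ PySem.List.pyGetD loads i 0 = l := by
  unfold pairs
  simp only [List.mem_map, PySem.List.mem_pyRange_one, Prod.mk.injEq]
  constructor
  · rintro ⟨i', ⟨h1, h2⟩, h3, rfl⟩; exact ⟨h1, h2, h3⟩
  · rintro ⟨h1, h2, h3⟩; exact ⟨i, ⟨h1, h2⟩, h3, rfl⟩

lemma pyGetD_pySetD_int {α : Type} (xs : List α) (i j : Int) (v d : α)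
    (h0j : 0 ≤ j) (hj : j < (xs.length : Int)) (h0i : 0 ≤ i) :
    PySem.List.pyGetD (PySem.List.pySetD xs j v) i d = if i = j then v else PySem.List.pyGetD xs i d := by
  obtain ⟨jn, rfl⟩ : ∃ jn : Nat, j = (jn : Int) := ⟨j.toNat, (Int.toNat_of_nonneg h0j).symm⟩
  obtain ⟨im, rfl⟩ : ∃ im : Nat, i = (im : Int) := ⟨i.toNat, (Int.toNat_of_nonneg h0i).symm⟩
  rw [PySem.List.pyGetD_pySetD_natCast xs jn im v d (by exact_mod_cast hj)]
  simp [Nat.cast_inj]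

lemma pairs_split (n : Int) (loads : List Int) (j : Int) (h0 : 0 ≤ j) (hj : j < n) :
    pairs n loads
      = (PySem.List.pyRange 0 j 1).map (fun i => (PySem.List.pyGetD loads i 0, i))
        ++ (PySem.List.pyGetD loads j 0, j)
          :: (PySem.List.pyRange (j+1) n 1).map (fun i => (PySem.List.pyGetD loads i 0, i)) := by
  unfold pairs
  rw [PySem.List.pyRange_one_append 0 j n h0 hj.le, List.map_append,
    PySem.List.pyRange_one_cons hj, List.map_cons]

lemma pairs_set (n : Int) (loads : List Int) (j v : Int) (h0 : 0 ≤ j) (hj : j < n)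
    (hlen : (loads.length : Int) = n) :
    pairs n (PySem.List.pySetD loads j v)
      = (PySem.List.pyRange 0 j 1).map (fun i => (PySem.List.pyGetD loads i 0, i))
        ++ (v, j) :: (PySem.List.pyRange (j+1) n 1).map (fun i => (PySem.List.pyGetD loads i 0, i)) := by
  rw [pairs_split n _ j h0 hj]
  have hjlen : j < (loads.length : Int) := by omega
  congr 1
  · apply List.map_congr_left
    intro i hi
    have := PySem.List.mem_pyRange_one.mp hi
    rw [pyGetD_pySetD_int loads i j v 0 h0 hjlen (by omega), if_neg (by omega)]
  · rw [pyGetD_pySetD_int loads j j v 0 h0 hjlen h0, if_pos rfl]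
    congr 1
    apply List.map_congr_left
    intro i hi
    have := PySem.List.mem_pyRange_one.mp hi
    rw [pyGetD_pySetD_int loads i j v 0 h0 hjlen (by omega), if_neg (by omega)]

lemma queue_head_props (n : Int) (loads : List Int) (l j : Int) (rest : List (Int × Int))
    (hperm : ((l, j) :: rest).Perm (pairs n loads))
    (hsort : ((l, j) :: rest).Pairwise lexLe) :
    0 ≤ j ∧ j < n ∧ PySem.List.pyGetD loads j 0 = l ∧
    (∀ i, 0 ≤ i → i < j → l < PySem.List.pyGetD loads i 0) ∧
    (∀ i, j ≤ i → i < n → l ≤ PySem.List.pyGetD loads i 0) := by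
  have hhead : (l, j) ∈ pairs n loads := hperm.subset (List.mem_cons_self)
  rcases mem_pairs.mp hhead with ⟨h0, hjn, hl⟩
  rcases List.pairwise_cons.mp hsort with ⟨hmin, -⟩
  have key : ∀ i, 0 ≤ i → i < n →
      (PySem.List.pyGetD loads i 0, i) = (l, j) ∨ lexLe (l, j) (PySem.List.pyGetD loads i 0, i) := by
    intro i hi0 hin
    have : (PySem.List.pyGetD loads i 0, i) ∈ pairs n loads := mem_pairs.mpr ⟨hi0, hin, rfl⟩
    have : (PySem.List.pyGetD loads i 0, i) ∈ (l, j) :: rest := hperm.symm.subset this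
    rcases List.mem_cons.mp this with h | h
    · exact Or.inl h
    · exact Or.inr (hmin _ h)
  refine ⟨h0, hjn, hl, ?_, ?_⟩
  · intro i hi0 hij
    rcases key i hi0 (by omega) with h | h
    · exact absurd (congrArg Prod.snd h) (by simp; omega)
    · unfold lexLe at h; simp at h; omega
  · intro i hji hin
    rcases key i (by omega) hin with h | h
    · have := congrArg Prod.fst h; simp at this; omega
    · unfold lexLe at h; simp at h; omega

-- A's loop equals the queue-driven loop stepQ
lemma loop_agree (n : Int) (items : List (List (String × Int))) :
    ∀ (shards : List (List (List (String × Int)))) (loads : List Int) (queue : List (Int × Int)),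
    (loads.length : Int) = n → 1 ≤ n →
    queue.Perm (pairs n loads) → queue.Pairwise lexLe →
    (items.foldl (stepA n) (shards, loads)).1 = (items.foldl stepQ (shards, queue)).1 := by
  induction items with
  | nil => intro shards loads queue _ _ _ _; rfl
  | cons record items ih =>
    intro shards loads queue hlen hn hperm hsort
    rcases hq : queue with _ | ⟨⟨l, j⟩, rest⟩
    · exfalso
      subst hq
      have hlp : (pairs n loads).length = 0 := (hperm.length_eq).symm
      unfold pairs at hlp
      rw [List.length_map, PySem.List.length_pyRange_one] at hlp
      omega
    · subst hq
      rcases queue_head_props n loads l j rest hperm hsort with ⟨h0, hjn, hl, hlt, hle⟩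
      simp only [List.foldl_cons]
      have hidx : (PySem.List.min? (PySem.List.pyRange 0 n 1)
          (fun i => PySem.List.pyGetD loads i 0)).getD 0 = j := by
        rw [min?_first (fun i => PySem.List.pyGetD loads i 0) n j h0 hjn
          (fun i hi0 hij => by simpa [hl] using hlt i hi0 hij)
          (fun i hji hin => by simpa [hl] using hle i hji hin)]
        rfl
      have hstepA : stepA n (shards, loads) record
          = (PySem.List.pySetD shards j (PySem.List.pyGetD shards j [] ++ [record]),
             PySem.List.pySetD loads j (l + max 1 (recArea record))) := by
        simp only [stepA, hidx, hl]
      have hstepQ : stepQ (shards, ((l, j) :: rest)) record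
          = (PySem.List.pySetD shards j (PySem.List.pyGetD shards j [] ++ [record]),
             bInsert rest (l + max 1 (recArea record), j)) := rfl
      rw [hstepA, hstepQ]
      apply ih
      · rw [PySem.List.length_pySetD]; exact hlen
      · exact hn
      · have hrest : rest.Perm
            ((PySem.List.pyRange 0 j 1).map (fun i => (PySem.List.pyGetD loads i 0, i))
              ++ (PySem.List.pyRange (j+1) n 1).map (fun i => (PySem.List.pyGetD loads i 0, i))) := by
          have h1 := hperm.trans (by rw [pairs_split n loads j h0 hjn, hl])
          exact (h1.trans List.perm_middle).cons_inv
        rw [pairs_set n loads j (l + max 1 (recArea record)) h0 hjn hlen]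
        exact ((bInsert_perm rest _).trans
          ((hrest.cons _).trans List.perm_middle.symm))
      · exact bInsert_pairwise _ (List.pairwise_cons.mp hsort).2

lemma runAssign_nil_q (items : List (List (String × Int))) : runAssign items [] = [] := by
  cases items <;> rfl

-- B's foldl produces exactly runAssign
lemma bfold_assign (items : List (List (String × Int))) :
    ∀ (q : List (Int × Int)) (acc : List Int),
    (items.foldl bStep (acc, q)).1 = acc ++ runAssign items q := by
  induction items with
  | nil => intro q acc; simp [runAssign]
  | cons r rs ih =>
    intro q acc
    rcases q with _ | ⟨⟨l, j⟩, rest⟩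
    · simp only [List.foldl_cons, bStep]
      rw [ih [] acc, runAssign_nil_q, runAssign_nil_q]
    · simp only [List.foldl_cons, bStep, runAssign]
      rw [ih _ _]
      simp

-- the queue-driven loop's shards equal the grouping of runAssign
lemma stepQ_group (items : List (List (String × Int))) :
    ∀ (shards : List (List (List (String × Int)))) (q : List (Int × Int)),
    (∀ p ∈ q, 0 ≤ p.2 ∧ p.2 < (shards.length : Int)) →
    (items.foldl stepQ (shards, q)).1
      = (PySem.List.pyRange 0 (shards.length : Int) 1).map
          (fun i => PySem.List.pyGetD shards i []
            ++ (items.zip (runAssign items q)).filterMap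
                 (fun p => if p.2 == i then some p.1 else none)) := by
  induction items with
  | nil =>
    intro shards q _
    simp only [List.foldl_nil, runAssign, List.zip_nil_right, List.filterMap_nil,
      List.append_nil]
    exact (PySem.List.map_pyGetD_pyRange_zero' shards []).symm
  | cons r rs ih =>
    intro shards q hb
    rcases q with _ | ⟨⟨l, j⟩, rest⟩
    · simp only [List.foldl_cons, stepQ]
      rw [ih shards [] (by simp), runAssign_nil_q]
      simp [runAssign_nil_q]
    · obtain ⟨h0j, hjlen⟩ := hb (l, j) (List.mem_cons_self)
      simp only [List.foldl_cons, stepQ]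
      set e : Int × Int := (l + max 1 (recArea r), j) with he
      set shards' := PySem.List.pySetD shards j (PySem.List.pyGetD shards j [] ++ [r]) with hs'
      have hlen' : (shards'.length : Int) = (shards.length : Int) := by
        rw [hs', PySem.List.length_pySetD]
      rw [ih shards' (bInsert rest e) ?bnd]
      case bnd =>
        intro p hp
        have : p ∈ e :: rest := (bInsert_perm rest e).mem_iff.mp hp
        rw [hlen']
        rcases List.mem_cons.mp this with rfl | hp'
        · exact ⟨h0j, hjlen⟩
        · exact hb p (List.mem_cons_of_mem _ hp')
      rw [hlen']
      apply List.map_congr_left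
      intro i hi
      have hir := PySem.List.mem_pyRange_one.mp hi
      rw [hs', pyGetD_pySetD_int shards i j _ [] h0j hjlen (by omega)]
      simp only [runAssign, List.zip_cons_cons, List.filterMap_cons]
      by_cases hij : i = j
      · subst hij
        simp only [beq_self_eq_true]
        simp [he]
      · rw [if_neg hij]
        have : (j == i) = false := by simp; omega
        rw [this]
        simp [he]

-- ===== VERDICT (by name: the statement is the Claim_ definition above) =====
theorem greedy_balance_by_area_spec : Claim_equal_greedy_balance_by_area := by
  intro records n _ hpre
  unfold Spec_greedy_balance_by_area
  rcases hpre with rfl | hn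
  · have hnil : PySem.List.sorted ([] : List (List (String × Int))) (fun x => recArea x) true = [] :=
      (PySem.List.sorted_eq_nil_iff _ _ _).mpr rfl
    simp [greedy_balance_by_area, greedy_balance_by_area_alt, hnil]
  · simp only [greedy_balance_by_area, greedy_balance_by_area_alt]
    set items := PySem.List.sorted records (fun x => recArea x) true with hitems
    set queue : List (Int × Int) := (PySem.List.pyRange 0 n 1).map (fun i => (0, i)) with hqueue
    set shards0 : List (List (List (String × Int))) :=
      (PySem.List.pyRange 0 n 1).map (fun _ => []) with hsh
    have hlen0 : ((shards0.length : Nat) : Int) = n := by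
      rw [hsh, List.length_map, PySem.List.length_pyRange_one]; omega
    have hA : (items.foldl (stepA n) (shards0, (PySem.List.pyRange 0 n 1).map (fun _ => (0:Int)))).1
        = (items.foldl stepQ (shards0, queue)).1 := by
      apply loop_agree
      · rw [List.length_map, PySem.List.length_pyRange_one]; omega
      · exact hn
      · have : queue = pairs n ((PySem.List.pyRange 0 n 1).map (fun _ => (0 : Int))) := by
          rw [hqueue]
          unfold pairs
          apply List.map_congr_left
          intro i hi
          have := PySem.List.mem_pyRange_one.mp hi
          rw [PySem.List.pyGetD_map_pyRange_of_nonneg (fun _ => (0:Int)) n i 0 (by omega) (by omega)]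
        rw [this]
      · rw [hqueue]
        apply List.pairwise_map.mpr
        exact (PySem.List.pairwise_lt_pyRange_one 0 n).imp
          (fun h => by unfold lexLe; omega)
    rw [hA, stepQ_group items shards0 queue ?bnd]
    case bnd =>
      intro p hp
      rw [hqueue] at hp
      rcases List.mem_map.mp hp with ⟨i, hi, rfl⟩
      have := PySem.List.mem_pyRange_one.mp hi
      rw [hlen0]
      exact ⟨by omega, by omega⟩
    rw [hlen0, bfold_assign items queue, List.nil_append]
    apply List.map_congr_left
    intro i hi
    have hir := PySem.List.mem_pyRange_one.mp hi
    rw [hsh, PySem.List.pyGetD_map_pyRange_of_nonneg (fun _ => ([] : List (List (String × Int)))) n i [] (by omega) (by omega)]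
    rfl
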